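-- pv_equiv track=rewrite | github.com/oddeirikigland/div | highest_product/highest_product.py | firstOrSecondIsNegative
-- ===== SOURCE A (Python) =====
-- def firstOrSecondIsNegative(integers, product, positiveOne, positiveTwo, negativeOne):
--     highest_value = product
--     posNumbVisited = False
--     negNumbVisited = False
--     positiveProduct = positiveOne * positiveTwo
--     negativeProduct = positiveOne * negativeOne
--     for numb in integers[3:]:
--         if posNumbVisited and negNumbVisited:
--             break
--         if numb >= 0:
--             posNumbVisited = True
--             value = positiveProduct * numb
--             if value > highest_value:
--                 highest_value = value
--         else:
--             negNumbVisited = True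
--             value = negativeProduct * numb
--             if value > highest_value:
--                 highest_value = value
--     return highest_value, posNumbVisited
-- ===== SOURCE B (Python) =====
-- def firstOrSecondIsNegative(integers, product, positiveOne, positiveTwo, negativeOne):
--     tail = integers[3:]
--     i = next((k for k, n in enumerate(tail) if n >= 0), None)
--     j = next((k for k, n in enumerate(tail) if n < 0), None)
--     prefix = tail if i is None or j is None else tail[:max(i, j) + 1]
--     positiveProduct = positiveOne * positiveTwo
--     negativeProduct = positiveOne * negativeOne
--     candidates = [product] + [(positiveProduct if n >= 0 else negativeProduct) * n for n in prefix]
--     return max(candidates), i is not None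
-- ===== Notes on version B (the rewrite author's own statement) =====
-- stated objective: alternative
-- what changed: Replaces A's stateful break-loop (running max and visited flags updated per element) by computing the processed prefix directly from the positions of the first non-negative and first negative element and then taking a single max over the candidate-product list.
import Mathlib
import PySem

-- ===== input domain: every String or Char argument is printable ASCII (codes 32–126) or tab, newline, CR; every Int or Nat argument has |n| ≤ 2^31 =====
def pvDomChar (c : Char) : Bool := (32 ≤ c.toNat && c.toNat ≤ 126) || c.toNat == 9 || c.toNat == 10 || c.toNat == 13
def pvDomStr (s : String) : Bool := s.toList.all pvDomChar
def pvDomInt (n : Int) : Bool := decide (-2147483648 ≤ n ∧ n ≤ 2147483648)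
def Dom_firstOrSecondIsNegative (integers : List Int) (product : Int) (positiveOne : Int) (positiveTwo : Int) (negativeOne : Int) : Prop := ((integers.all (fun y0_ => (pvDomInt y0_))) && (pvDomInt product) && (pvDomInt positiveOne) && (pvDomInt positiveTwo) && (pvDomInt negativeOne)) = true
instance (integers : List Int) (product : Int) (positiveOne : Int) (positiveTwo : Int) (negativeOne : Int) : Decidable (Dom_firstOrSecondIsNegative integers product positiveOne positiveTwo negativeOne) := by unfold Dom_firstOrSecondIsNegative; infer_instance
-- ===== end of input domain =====

-- B replaces A's stateful break-loop by computing the processed prefix directly from the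
-- first non-negative / first negative positions and taking one max over the candidate list
-- (objective: alternative decomposition, same cost).

-- ===== PORT A =====
-- the for-loop of A as structural recursion over the same state (highest_value, posNumbVisited, negNumbVisited)
def pvAloop (l : List Int) (hv : Int) (posV negV : Bool) (pP nP : Int) : Int × Bool :=
  match l with
  | [] => (hv, posV)
  | numb :: rest =>
    if posV && negV then (hv, posV)
    else if numb ≥ 0 then
      let v := pP * numb
      pvAloop rest (if v > hv then v else hv) true negV pP nP
    else
      let v := nP * numb
      pvAloop rest (if v > hv then v else hv) posV true pP nP

def firstOrSecondIsNegative (integers : List Int) (product : Int) (positiveOne : Int) (positiveTwo : Int) (negativeOne : Int) : Int × Bool :=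
  pvAloop (PySem.List.slice integers (some 3) none) product false false
    (positiveOne * positiveTwo) (positiveOne * negativeOne)

-- ===== PORT B =====
def firstOrSecondIsNegative_alt (integers : List Int) (product : Int) (positiveOne : Int) (positiveTwo : Int) (negativeOne : Int) : Int × Bool :=
  let tail := PySem.List.slice integers (some 3) none
  let i := tail.findIdx? (fun n => decide (n ≥ 0))
  let j := tail.findIdx? (fun n => decide (n < 0))
  let pre := match i, j with
    | some i', some j' => tail.take (max i' j' + 1)
    | _, _ => tail
  let positiveProduct := positiveOne * positiveTwo
  let negativeProduct := positiveOne * negativeOne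
  let candidates := product :: pre.map (fun n => (if n ≥ 0 then positiveProduct else negativeProduct) * n)
  ((PySem.List.max? candidates (fun y => y)).getD product, i.isSome)

-- ===== PRECONDITION & SPEC =====
def Spec_firstOrSecondIsNegative (integers : List Int) (product : Int) (positiveOne : Int) (positiveTwo : Int) (negativeOne : Int) (out : Int × Bool) : Prop := out = firstOrSecondIsNegative_alt integers product positiveOne positiveTwo negativeOne
instance (integers : List Int) (product : Int) (positiveOne : Int) (positiveTwo : Int) (negativeOne : Int) (out : Int × Bool) : Decidable (Spec_firstOrSecondIsNegative integers product positiveOne positiveTwo negativeOne out) := by unfold Spec_firstOrSecondIsNegative; infer_instance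

-- ===== CLAIM (what is proved, stated in full; the proofs are below) =====
def Claim_equal_firstOrSecondIsNegative : Prop := ∀ (integers : List Int) (product : Int) (positiveOne : Int) (positiveTwo : Int) (negativeOne : Int), Dom_firstOrSecondIsNegative integers product positiveOne positiveTwo negativeOne → Spec_firstOrSecondIsNegative integers product positiveOne positiveTwo negativeOne (firstOrSecondIsNegative integers product positiveOne positiveTwo negativeOne)

-- ===== LEMMAS AND PROOFS =====

-- the per-element candidate value
def pvF (pP nP n : Int) : Int := (if n ≥ 0 then pP else nP) * n

-- the prefix processed once the state is (posV, negV): up to and including the first element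
-- completing the pair
def pvPreNeg (l : List Int) : List Int :=
  match l.findIdx? (fun n => decide (n < 0)) with
  | some j => l.take (j + 1)
  | none => l

def pvPrePos (l : List Int) : List Int :=
  match l.findIdx? (fun n => decide (n ≥ 0)) with
  | some i => l.take (i + 1)
  | none => l

theorem pv_step (hv v : Int) : (if v > hv then v else hv) = max hv v := by
  split <;> omega

theorem pvAloop_TT (l : List Int) (hv pP nP : Int) :
    pvAloop l hv true true pP nP = (hv, true) := by
  cases l <;> simp [pvAloop]

theorem pvAloop_TF (l : List Int) (hv pP nP : Int) :
    pvAloop l hv true false pP nP = (List.foldl max hv ((pvPreNeg l).map (pvF pP nP)), true) := by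
  induction l generalizing hv with
  | nil => simp [pvAloop, pvPreNeg]
  | cons n rest ih =>
    by_cases h : n ≥ 0
    · have hneg : ¬ (n < 0) := by omega
      simp only [pvAloop, Bool.and_false, Bool.false_eq_true, if_false, if_pos h, pv_step, ih]
      simp only [pvPreNeg, List.findIdx?_cons, hneg, decide_false, Bool.false_eq_true, if_false]
      cases hf : rest.findIdx? (fun n => decide (n < 0)) <;> simp [pvF, h]
    · have hneg : n < 0 := by omega
      simp only [pvAloop, Bool.and_false, Bool.false_eq_true, if_false, if_neg h, pv_step]
      rw [pvAloop_TT]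
      simp [pvPreNeg, List.findIdx?_cons, hneg, pvF, h]

theorem pvAloop_FT (l : List Int) (hv pP nP : Int) :
    pvAloop l hv false true pP nP =
      (List.foldl max hv ((pvPrePos l).map (pvF pP nP)),
        (l.findIdx? (fun n => decide (n ≥ 0))).isSome) := by
  induction l generalizing hv with
  | nil => simp [pvAloop, pvPrePos]
  | cons n rest ih =>
    by_cases h : n ≥ 0
    · simp only [pvAloop, Bool.false_and, Bool.false_eq_true, if_false, if_pos h, pv_step]
      rw [pvAloop_TT]
      simp [pvPrePos, List.findIdx?_cons, h, pvF]
    · simp only [pvAloop, Bool.false_and, Bool.false_eq_true, if_false, if_neg h, pv_step, ih]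
      simp only [pvPrePos, List.findIdx?_cons, h, decide_false, Bool.false_eq_true, if_false]
      cases hf : rest.findIdx? (fun n => decide (n ≥ 0)) <;> simp [pvF, h]

theorem pvF_map (pP nP : Int) (l : List Int) :
    l.map (pvF pP nP) = l.map (fun n => if 0 ≤ n then pP * n else nP * n) := by
  refine List.map_congr_left ?_
  intro m _
  simp [pvF, ite_mul, ge_iff_le]

theorem firstOrSecondIsNegative_spec : Claim_equal_firstOrSecondIsNegative := by
  intro integers product positiveOne positiveTwo negativeOne _
  unfold Spec_firstOrSecondIsNegative firstOrSecondIsNegative firstOrSecondIsNegative_alt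
  generalize PySem.List.slice integers (some 3) none = tail
  cases tail with
  | nil => simp [pvAloop, PySem.List.max?]
  | cons n rest =>
    by_cases h : n ≥ 0
    · have hneg : ¬ (n < 0) := by omega
      simp only [pvAloop, Bool.and_false, Bool.false_eq_true, if_false, if_pos h, pv_step,
        pvAloop_TF]
      simp only [List.findIdx?_cons, h, hneg, decide_true, decide_false, Bool.false_eq_true,
        if_false, if_true]
      cases hf : rest.findIdx? (fun n => decide (n < 0)) <;>
        simp [hf, pvPreNeg, pvF_map, h, PySem.List.max?_id_cons]
    · have hneg : n < 0 := by omega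
      simp only [pvAloop, Bool.and_false, Bool.false_eq_true, if_false, if_neg h, pv_step,
        pvAloop_FT]
      simp only [List.findIdx?_cons, h, hneg, decide_true, decide_false, Bool.false_eq_true,
        if_false, if_true]
      cases hf : rest.findIdx? (fun n => decide (n ≥ 0)) <;>
        simp [hf, pvPrePos, pvF_map, h, PySem.List.max?_id_cons]
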